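-- pv_equiv track=rewrite | github.com/Ting-chien/leetcode | Interview/EmploymentHero/task2.py | longest_two_digit_fragment
-- ===== SOURCE A (Python) =====
-- from collections import defaultdict
--
-- def longest_two_digit_fragment(A):
--     """
--     Given integer array A, find the longest fragment
--     which consist at most two different digits.
--
--     Example1:
--      - Input: [23,333,33,30,0,505]
--      - Output: 4. Elements includes 33,33,30,0.
--     """
--
--     freq = defaultdict(int)
--     l = 0
--     dist = 0
--     res = 0
--     n = len(A)
--
--     for r in range(n):
--         for d in set(str(A[r])):
--             if freq[d] == 0:
--                 dist += 1
--             freq[d] += 1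
--
--         # Shrink until valid
--         while dist > 2:
--             for d in set(str(A[l])):
--                 freq[d] -= 1
--                 if freq[d] == 0:
--                     dist -= 1
--             l += 1
--
--         res = max(res, r-l+1)
--
--     return res
-- ===== SOURCE B (Python) =====
-- def longest_two_digit_fragment(A):
--     """
--     Given integer array A, find the longest fragment
--     which consist at most two different digits.
--     """
--     res = 0
--     n = len(A)
--     for l in range(n):
--         digs = set()
--         for r in range(l, n):
--             digs |= set(str(A[r]))
--             if len(digs) > 2:
--                 break
--             res = max(res, r - l + 1)
--     return res
-- ===== Notes on version B (the rewrite author's own statement) =====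
-- stated objective: simpler
-- what changed: Replaced the O(n) sliding window (digit-frequency dict, distinct counter and monotone left pointer) by a per-start brute-force scan that grows a fresh digit set and breaks as soon as more than two distinct characters appear.
import Mathlib
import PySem

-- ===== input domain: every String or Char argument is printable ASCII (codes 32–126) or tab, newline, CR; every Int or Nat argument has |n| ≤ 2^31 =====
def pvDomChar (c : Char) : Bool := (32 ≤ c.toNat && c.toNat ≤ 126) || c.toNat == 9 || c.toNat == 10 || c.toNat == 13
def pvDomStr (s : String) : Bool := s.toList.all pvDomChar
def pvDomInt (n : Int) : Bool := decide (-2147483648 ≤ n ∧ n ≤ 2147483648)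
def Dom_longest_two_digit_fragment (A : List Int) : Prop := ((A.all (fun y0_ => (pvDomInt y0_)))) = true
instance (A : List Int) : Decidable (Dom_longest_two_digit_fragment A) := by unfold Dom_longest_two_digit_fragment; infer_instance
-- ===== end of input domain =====

-- B replaces A's sliding window (frequency dict + monotone left pointer) by a per-start
-- brute-force scan with a fresh digit set per start (objective: simpler; not faster).

-- ===== PORT A =====
-- the characters of str(x)
def pvChars (x : Int) : List Char := PySem.Int.toChars x

-- A[i]; every use has 0 <= i < len(A), so the default is never taken
def pvAt (A : List Int) (i : Int) : Int := (PySem.List.pyGet? A i).getD 0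

-- 'for d in set(str(A[r])): if freq[d]==0: dist+=1; freq[d]+=1' over state (freq, dist)
def pvAdd (fd : PySem.Dict Char Int × Int) (s : List Char) : PySem.Dict Char Int × Int :=
  s.foldl (fun fd d =>
    (fd.1.insert d (fd.1.getD d 0 + 1), if fd.1.getD d 0 = 0 then fd.2 + 1 else fd.2)) fd

-- 'for d in set(str(A[l])): freq[d]-=1; if freq[d]==0: dist-=1'
def pvRemove (fd : PySem.Dict Char Int × Int) (s : List Char) : PySem.Dict Char Int × Int :=
  s.foldl (fun fd d =>
    (fd.1.insert d (fd.1.getD d 0 - 1),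
     if fd.1.getD d 0 - 1 = 0 then fd.2 - 1 else fd.2)) fd

-- 'while dist > 2: ...; l += 1' — fuel A.length+1 provably suffices (pvShrink_spec below)
def pvShrink (A : List Int) : Nat → PySem.Dict Char Int × Int × Int → PySem.Dict Char Int × Int × Int
  | 0, st => st
  | fuel+1, (freq, l, dist) =>
    if 2 < dist then
      let fd := pvRemove (freq, dist) (PySem.Set.ofList (pvChars (pvAt A l)))
      pvShrink A fuel (fd.1, l + 1, fd.2)
    else (freq, l, dist)

-- one iteration of 'for r in range(n)'
def pvStepA (A : List Int) (st : PySem.Dict Char Int × Int × Int × Int) (r : Int) :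
    PySem.Dict Char Int × Int × Int × Int :=
  let fd := pvAdd (st.1, st.2.2.1) (PySem.Set.ofList (pvChars (pvAt A r)))
  let s2 := pvShrink A (A.length + 1) (fd.1, st.2.1, fd.2)
  (s2.1, s2.2.1, s2.2.2, max st.2.2.2 (r - s2.2.1 + 1))

def longest_two_digit_fragment (A : List Int) : Int :=
  let n := PySem.List.len A
  ((PySem.List.pyRange 0 n 1).foldl (pvStepA A)
    ((PySem.Dict.empty : PySem.Dict Char Int), 0, 0, 0)).2.2.2

-- ===== PORT B =====
-- 'for r in range(l, n): digs |= set(str(A[r])); if len(digs) > 2: break; res = max(res, r-l+1)'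
def pvInner (l : Int) : List Int → Int → PySem.Set Char → Int → Int
  | [], _r, _digs, res => res
  | x :: xs, r, digs, res =>
    let digs' := PySem.Set.union digs (pvChars x)
    if 2 < PySem.Set.len digs' then res
    else pvInner l xs (r + 1) digs' (max res (r - l + 1))

def longest_two_digit_fragment_alt (A : List Int) : Int :=
  let n := PySem.List.len A
  (PySem.List.pyRange 0 n 1).foldl (fun res l =>
    pvInner l (A.drop l.toNat) l PySem.Set.empty res) 0

-- ===== PRECONDITION & SPEC =====
def Spec_longest_two_digit_fragment (A : List Int) (out : Int) : Prop := out = longest_two_digit_fragment_alt A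
instance (A : List Int) (out : Int) : Decidable (Spec_longest_two_digit_fragment A out) := by unfold Spec_longest_two_digit_fragment; infer_instance

-- ===== CLAIM (what is proved, stated in full; the proofs are below) =====
def Claim_equal_longest_two_digit_fragment : Prop := ∀ (A : List Int), Dom_longest_two_digit_fragment A → Spec_longest_two_digit_fragment A (longest_two_digit_fragment A)

-- ===== LEMMAS AND PROOFS =====

def pvW (A : List Int) (l k : Nat) : List Int := (A.drop l).take (k - l)

def pvCL (A : List Int) (l k : Nat) : List Char := (pvW A l k).flatMap pvChars

def pvDc (A : List Int) (l k : Nat) : Nat := (pvCL A l k).toFinset.card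

def pvCnt (A : List Int) (l k : Nat) (d : Char) : Nat :=
  (pvW A l k).countP (fun x => decide (d ∈ pvChars x))

lemma pvW_succ (A : List Int) {l k : Nat} (hlk : l ≤ k) (hk : k < A.length) :
    pvW A l (k+1) = pvW A l k ++ [A[k]] := by
  have h1 : k + 1 - l = (k - l) + 1 := by omega
  have h2 : (A.drop l)[k - l]? = some A[k] := by
    rw [List.getElem?_drop]
    rw [List.getElem?_eq_getElem (by omega)]
    congr 1; congr 1; omega
  simp [pvW, h1, List.take_add_one, h2]

lemma pvW_cons (A : List Int) {l k : Nat} (hlk : l < k) (hl : l < A.length) :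
    pvW A l k = A[l] :: pvW A (l+1) k := by
  have h1 : A.drop l = A[l] :: A.drop (l+1) := List.drop_eq_getElem_cons hl
  have h2 : k - l = (k - (l+1)) + 1 := by omega
  rw [pvW, h1, h2, List.take_succ_cons]; rfl

lemma mem_pvW (A : List Int) {l k : Nat} {x : Int} :
    x ∈ pvW A l k ↔ ∃ i, l ≤ i ∧ i < k ∧ ∃ h : i < A.length, A[i] = x := by
  constructor
  · intro hx
    rw [List.mem_iff_getElem] at hx
    obtain ⟨j, hj, hget⟩ := hx
    simp only [pvW, List.length_take, List.length_drop, lt_min_iff] at hj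
    refine ⟨l + j, by omega, by omega, by omega, ?_⟩
    rw [← hget]
    simp [pvW, List.getElem_take, List.getElem_drop]
  · rintro ⟨i, hli, hik, hi, rfl⟩
    rw [List.mem_iff_getElem]
    refine ⟨i - l, ?_, ?_⟩
    · simp only [pvW, List.length_take, List.length_drop, lt_min_iff]; omega
    · simp only [pvW, List.getElem_take, List.getElem_drop]
      congr 1; omega

lemma mem_pvCL (A : List Int) {l k : Nat} {d : Char} :
    d ∈ pvCL A l k ↔ ∃ x ∈ pvW A l k, d ∈ pvChars x := by
  simp [pvCL, List.mem_flatMap]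

lemma pvCL_subset (A : List Int) {l l' k k' : Nat} (hl : l ≤ l') (hk : k' ≤ k) :
    ∀ d ∈ pvCL A l' k', d ∈ pvCL A l k := by
  intro d hd
  rw [mem_pvCL] at hd ⊢
  obtain ⟨x, hx, hdx⟩ := hd
  rw [mem_pvW] at hx
  obtain ⟨i, h1, h2, h3, rfl⟩ := hx
  exact ⟨A[i], (mem_pvW A).2 ⟨i, by omega, by omega, h3, rfl⟩, hdx⟩

lemma pvDc_mono (A : List Int) {l l' k k' : Nat} (hl : l ≤ l') (hk : k' ≤ k) :
    pvDc A l' k' ≤ pvDc A l k := by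
  apply Finset.card_le_card
  intro d hd
  rw [List.mem_toFinset] at hd ⊢
  exact pvCL_subset A hl hk d hd

lemma pvCnt_pos (A : List Int) (l k : Nat) (d : Char) :
    0 < pvCnt A l k d ↔ d ∈ pvCL A l k := by
  rw [pvCnt, List.countP_pos_iff, mem_pvCL]
  simp

lemma pvCL_succ (A : List Int) {l k : Nat} (hlk : l ≤ k) (hk : k < A.length) :
    pvCL A l (k+1) = pvCL A l k ++ pvChars A[k] := by
  simp [pvCL, pvW_succ A hlk hk]

lemma pvCL_cons (A : List Int) {l k : Nat} (hlk : l < k) (hl : l < A.length) :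
    pvCL A l k = pvChars A[l] ++ pvCL A (l+1) k := by
  simp [pvCL, pvW_cons A hlk hl]

lemma pvCnt_succ (A : List Int) {l k : Nat} (hlk : l ≤ k) (hk : k < A.length) (d : Char) :
    pvCnt A l (k+1) d = pvCnt A l k d + (if d ∈ pvChars A[k] then 1 else 0) := by
  rw [pvCnt, pvW_succ A hlk hk, List.countP_append, pvCnt]
  simp [List.countP_cons]

lemma pvCnt_cons (A : List Int) {l k : Nat} (hlk : l < k) (hl : l < A.length) (d : Char) :
    pvCnt A l k d = (if d ∈ pvChars A[l] then 1 else 0) + pvCnt A (l+1) k d := by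
  rw [pvCnt, pvW_cons A hlk hl, List.countP_cons, pvCnt]
  simp; omega

lemma pv_card_filter (s : List Char) (hs : s.Nodup) (T : Finset Char) :
    (s.filter (fun d => decide (d ∉ T))).length + T.card = (s.toFinset ∪ T).card := by
  have h1 : (s.filter (fun d => decide (d ∉ T))).length
      = (s.filter (fun d => decide (d ∉ T))).toFinset.card := by
    rw [List.card_toFinset, List.Nodup.dedup (hs.filter _)]
  have h2 : (s.filter (fun d => decide (d ∉ T))).toFinset = s.toFinset \ T := by
    ext x; simp
  rw [h1, h2, Finset.card_sdiff_add_card]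

lemma pvAdd_spec (s : List Char) (hs : s.Nodup) :
    ∀ (freq : PySem.Dict Char Int) (dist : Int) (c : Char → Int),
      (∀ d, freq.getD d 0 = c d) →
      (∀ d, (pvAdd (freq, dist) s).1.getD d 0 = c d + (if d ∈ s then 1 else 0)) ∧
      (pvAdd (freq, dist) s).2 = dist + ((s.filter (fun d => c d = 0)).length : Int) := by
  induction s with
  | nil => intro freq dist c hf; simp [pvAdd, hf]
  | cons a s' ih =>
    intro freq dist c hf
    have hna : a ∉ s' := (List.nodup_cons.1 hs).1
    have step : pvAdd (freq, dist) (a :: s')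
        = pvAdd (freq.insert a (c a + 1), if c a = 0 then dist + 1 else dist) s' := by
      simp [pvAdd, List.foldl_cons, hf a]
    have hf' : ∀ d, (freq.insert a (c a + 1)).getD d 0
        = (fun d => if d = a then c a + 1 else c d) d := by
      intro d
      by_cases hd : d = a
      · subst hd; simp [PySem.Dict.getD_insert_self]
      · simp [PySem.Dict.getD_insert_of_ne _ _ _ hd, hf d, hd]
    obtain ⟨ih1, ih2⟩ := ih (List.nodup_cons.1 hs).2 (freq.insert a (c a + 1))
      (if c a = 0 then dist + 1 else dist) _ hf'
    constructor
    · intro d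
      rw [step, ih1 d]
      by_cases hd : d = a
      · subst hd; simp [hna]
      · simp [hd, List.mem_cons]
    · rw [step, ih2]
      have hfe : s'.filter (fun d => decide ((if d = a then c a + 1 else c d) = 0))
          = s'.filter (fun d => decide (c d = 0)) := by
        apply List.filter_congr
        intro d hd
        have : d ≠ a := fun h => hna (h ▸ hd)
        simp [this]
      rw [hfe]
      by_cases hca : c a = 0 <;> simp [hca, List.filter_cons] <;> push_cast <;> ring

lemma pvRemove_spec (s : List Char) (hs : s.Nodup) :
    ∀ (freq : PySem.Dict Char Int) (dist : Int) (c : Char → Int),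
      (∀ d, freq.getD d 0 = c d) →
      (∀ d, (pvRemove (freq, dist) s).1.getD d 0 = c d - (if d ∈ s then 1 else 0)) ∧
      (pvRemove (freq, dist) s).2 = dist - ((s.filter (fun d => c d = 1)).length : Int) := by
  induction s with
  | nil => intro freq dist c hf; simp [pvRemove, hf]
  | cons a s' ih =>
    intro freq dist c hf
    have hna : a ∉ s' := (List.nodup_cons.1 hs).1
    have step : pvRemove (freq, dist) (a :: s')
        = pvRemove (freq.insert a (c a - 1), if c a - 1 = 0 then dist - 1 else dist) s' := by
      simp [pvRemove, List.foldl_cons, hf a, PySem.Dict.getD_insert_self]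
    have hf' : ∀ d, (freq.insert a (c a - 1)).getD d 0
        = (fun d => if d = a then c a - 1 else c d) d := by
      intro d
      by_cases hd : d = a
      · subst hd; simp [PySem.Dict.getD_insert_self]
      · simp [PySem.Dict.getD_insert_of_ne _ _ _ hd, hf d, hd]
    obtain ⟨ih1, ih2⟩ := ih (List.nodup_cons.1 hs).2 (freq.insert a (c a - 1))
      (if c a - 1 = 0 then dist - 1 else dist) _ hf'
    constructor
    · intro d
      rw [step, ih1 d]
      by_cases hd : d = a
      · subst hd; simp [hna]
      · simp [hd, List.mem_cons]
    · rw [step, ih2]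
      have hfe : s'.filter (fun d => decide ((if d = a then c a - 1 else c d) = 1))
          = s'.filter (fun d => decide (c d = 1)) := by
        apply List.filter_congr
        intro d hd
        have : d ≠ a := fun h => hna (h ▸ hd)
        simp [this]
      rw [hfe]
      have h1 : c a - 1 = 0 ↔ c a = 1 := by omega
      by_cases hca : c a = 1 <;>
        simp [h1, hca, List.filter_cons] <;> push_cast <;> ring

lemma pvAddStep (A : List Int) {l k : Nat} (hlk : l ≤ k) (hk : k < A.length)
    (freq : PySem.Dict Char Int) (dist : Int)
    (hf : ∀ d, freq.getD d 0 = (pvCnt A l k d : Int))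
    (hd : dist = (pvDc A l k : Int)) :
    (∀ d, (pvAdd (freq, dist) (PySem.Set.ofList (pvChars A[k]))).1.getD d 0
        = (pvCnt A l (k+1) d : Int)) ∧
    (pvAdd (freq, dist) (PySem.Set.ofList (pvChars A[k]))).2 = (pvDc A l (k+1) : Int) := by
  obtain ⟨h1, h2⟩ := pvAdd_spec (PySem.Set.ofList (pvChars A[k]))
    (PySem.Set.nodup_ofList _) freq dist (fun d => (pvCnt A l k d : Int)) hf
  constructor
  · intro d
    rw [h1 d, pvCnt_succ A hlk hk d]
    by_cases hm : d ∈ pvChars A[k] <;>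
      simp [hm, PySem.Set.mem_ofList]
  · rw [h2, hd]
    have hfe : (PySem.Set.ofList (pvChars A[k])).filter
          (fun d => decide ((pvCnt A l k d : Int) = 0))
        = (PySem.Set.ofList (pvChars A[k])).filter
          (fun d => decide (d ∉ (pvCL A l k).toFinset)) := by
      apply List.filter_congr
      intro d _
      have h0 : (pvCnt A l k d = 0) = (d ∉ (pvCL A l k).toFinset) := by
        rw [eq_iff_iff, List.mem_toFinset, ← pvCnt_pos A l k d]
        omega
      simp [Nat.cast_eq_zero, h0]
    rw [hfe]
    have hcard := pv_card_filter (PySem.Set.ofList (pvChars A[k]))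
      (PySem.Set.nodup_ofList _) (pvCL A l k).toFinset
    have hsetf : (PySem.Set.ofList (pvChars A[k])).toFinset = (pvChars A[k]).toFinset := by
      ext x; simp [List.mem_toFinset, PySem.Set.mem_ofList]
    have hdc : pvDc A l (k+1)
        = ((PySem.Set.ofList (pvChars A[k])).toFinset ∪ (pvCL A l k).toFinset).card := by
      rw [pvDc, pvCL_succ A hlk hk, List.toFinset_append, hsetf, Finset.union_comm]
    rw [hdc, ← hcard, pvDc]
    push_cast
    omega

lemma pvRemoveStep (A : List Int) {l k : Nat} (hlk : l < k) (hkn : k ≤ A.length)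
    (freq : PySem.Dict Char Int) (dist : Int)
    (hf : ∀ d, freq.getD d 0 = (pvCnt A l k d : Int))
    (hd : dist = (pvDc A l k : Int)) :
    (∀ d, (pvRemove (freq, dist) (PySem.Set.ofList (pvChars A[l]))).1.getD d 0
        = (pvCnt A (l+1) k d : Int)) ∧
    (pvRemove (freq, dist) (PySem.Set.ofList (pvChars A[l]))).2 = (pvDc A (l+1) k : Int) := by
  have hl : l < A.length := by omega
  obtain ⟨h1, h2⟩ := pvRemove_spec (PySem.Set.ofList (pvChars A[l]))
    (PySem.Set.nodup_ofList _) freq dist (fun d => (pvCnt A l k d : Int)) hf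
  constructor
  · intro d
    rw [h1 d, pvCnt_cons A hlk hl d]
    by_cases hm : d ∈ pvChars A[l] <;>
      simp [hm, PySem.Set.mem_ofList] <;> push_cast <;> ring
  · rw [h2, hd]
    have hfe : (PySem.Set.ofList (pvChars A[l])).filter
          (fun d => decide ((pvCnt A l k d : Int) = 1))
        = (PySem.Set.ofList (pvChars A[l])).filter
          (fun d => decide (d ∉ (pvCL A (l+1) k).toFinset)) := by
      apply List.filter_congr
      intro d hdm
      rw [PySem.Set.mem_ofList] at hdm
      have hc := pvCnt_cons A hlk hl d
      rw [if_pos hdm] at hc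
      have h0 : (pvCnt A l k d = 1) = (d ∉ (pvCL A (l+1) k).toFinset) := by
        rw [eq_iff_iff, List.mem_toFinset, ← pvCnt_pos A (l+1) k d]
        omega
      have h1 : ((pvCnt A l k d : Int) = 1) ↔ (pvCnt A l k d = 1) := by omega
      simp [h1, h0]
    rw [hfe]
    have hcard := pv_card_filter (PySem.Set.ofList (pvChars A[l]))
      (PySem.Set.nodup_ofList _) (pvCL A (l+1) k).toFinset
    have hsetf : (PySem.Set.ofList (pvChars A[l])).toFinset = (pvChars A[l]).toFinset := by
      ext x; simp [List.mem_toFinset, PySem.Set.mem_ofList]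
    have hdc : pvDc A l k
        = ((PySem.Set.ofList (pvChars A[l])).toFinset ∪ (pvCL A (l+1) k).toFinset).card := by
      rw [pvDc, pvCL_cons A hlk hl, List.toFinset_append, hsetf]
    rw [hdc, ← hcard, pvDc]
    push_cast
    omega

lemma pvOk_exists (A : List Int) (k : Nat) : ∃ l, pvDc A l k ≤ 2 :=
  ⟨k, by simp [pvDc, pvCL, pvW, Nat.sub_eq_zero_of_le (le_refl k)]⟩

def pvF (A : List Int) (k : Nat) : Nat := Nat.find (pvOk_exists A k)

lemma pvF_ok (A : List Int) (k : Nat) : pvDc A (pvF A k) k ≤ 2 := by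
  rw [pvF]; exact Nat.find_spec (pvOk_exists A k)

lemma pvF_le (A : List Int) {l k : Nat} (h : pvDc A l k ≤ 2) : pvF A k ≤ l := by
  rw [pvF]; exact Nat.find_min' (pvOk_exists A k) h

lemma pvF_le_self (A : List Int) (k : Nat) : pvF A k ≤ k :=
  pvF_le A (by simp [pvDc, pvCL, pvW, Nat.sub_eq_zero_of_le (le_refl k)])

lemma pvF_mono (A : List Int) (k : Nat) : pvF A k ≤ pvF A (k+1) :=
  pvF_le A (le_trans (pvDc_mono A (le_refl _) (Nat.le_succ k)) (pvF_ok A (k+1)))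

lemma lt_pvF (A : List Int) {l k : Nat} (h : ¬ pvDc A l k ≤ 2) : l < pvF A k := by
  by_contra hc
  exact h (le_trans (pvDc_mono A (Nat.le_of_not_lt hc) (le_refl _)) (pvF_ok A k))

lemma pvAt_eq (A : List Int) {l : Nat} (hl : l < A.length) : pvAt A (l : Int) = A[l] := by
  simp [pvAt, PySem.List.pyGet?_natCast, List.getElem?_eq_getElem hl]

lemma pvShrink_spec (A : List Int) (k : Nat) (hk : k + 1 ≤ A.length) :
    ∀ (fuel : Nat) (l : Nat) (freq : PySem.Dict Char Int) (dist : Int),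
      l ≤ pvF A (k+1) → (k+1) - l < fuel →
      (∀ d, freq.getD d 0 = (pvCnt A l (k+1) d : Int)) →
      dist = (pvDc A l (k+1) : Int) →
      (pvShrink A fuel (freq, (l : Int), dist)).2.1 = (pvF A (k+1) : Int) ∧
      (pvShrink A fuel (freq, (l : Int), dist)).2.2 = (pvDc A (pvF A (k+1)) (k+1) : Int) ∧
      (∀ d, (pvShrink A fuel (freq, (l : Int), dist)).1.getD d 0
          = (pvCnt A (pvF A (k+1)) (k+1) d : Int)) := by
  intro fuel
  induction fuel with
  | zero => intro l freq dist h1 h2 h3 h4; omega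
  | succ fuel ih =>
    intro l freq dist hlF hfuel hf hd
    by_cases hdist : 2 < dist
    · have hinv : ¬ pvDc A l (k+1) ≤ 2 := by omega
      have hlt : l < pvF A (k+1) := lt_pvF A hinv
      have hlk : l < k + 1 := lt_of_lt_of_le hlt (pvF_le_self A (k+1))
      obtain ⟨r1, r2⟩ := pvRemoveStep A hlk hk freq dist hf hd
      have hstep : pvShrink A (fuel+1) (freq, (l : Int), dist)
          = pvShrink A fuel
              ((pvRemove (freq, dist) (PySem.Set.ofList (pvChars A[l]))).1,
               ((l+1 : Nat) : Int),
               (pvRemove (freq, dist) (PySem.Set.ofList (pvChars A[l]))).2) := by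
        rw [pvShrink]
        rw [if_pos hdist, pvAt_eq A (by omega)]
        norm_cast
      rw [hstep]
      exact ih (l+1) _ _ hlt (by omega) r1 r2
    · have hok : pvDc A l (k+1) ≤ 2 := by
        have : (pvDc A l (k+1) : Int) ≤ 2 := by omega
        exact_mod_cast this
      have hFl : pvF A (k+1) = l := le_antisymm (pvF_le A hok) hlF
      rw [pvShrink, if_neg hdist]
      exact ⟨by simp [hFl], by simp [hFl, hd], by simpa [hFl] using hf⟩

def pvResSpec (A : List Int) (k : Nat) : Int :=
  (List.range k).foldl (fun (m : Int) (r : Nat) => max m ((r : Int) + 1 - (pvF A (r + 1) : Int))) 0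

lemma pvA_loop (A : List Int) : ∀ (k : Nat), k ≤ A.length →
    ((List.range k).foldl (fun st (r : Nat) => pvStepA A st (r : Int))
        ((PySem.Dict.empty : PySem.Dict Char Int), 0, 0, 0)).2.1 = (pvF A k : Int) ∧
    (∀ d, ((List.range k).foldl (fun st (r : Nat) => pvStepA A st (r : Int))
        ((PySem.Dict.empty : PySem.Dict Char Int), 0, 0, 0)).1.getD d 0
        = (pvCnt A (pvF A k) k d : Int)) ∧
    ((List.range k).foldl (fun st (r : Nat) => pvStepA A st (r : Int))
        ((PySem.Dict.empty : PySem.Dict Char Int), 0, 0, 0)).2.2.1 = (pvDc A (pvF A k) k : Int) ∧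
    ((List.range k).foldl (fun st (r : Nat) => pvStepA A st (r : Int))
        ((PySem.Dict.empty : PySem.Dict Char Int), 0, 0, 0)).2.2.2 = pvResSpec A k := by
  intro k
  induction k with
  | zero =>
    intro _
    have hF0 : pvF A 0 = 0 := Nat.eq_zero_of_le_zero (pvF_le_self A 0)
    refine ⟨by simp [hF0], ?_, ?_, by simp [pvResSpec]⟩
    · intro d
      simp [hF0, pvCnt, pvW, PySem.Dict.getD, PySem.Dict.empty, PySem.Dict.get?]
    · simp [hF0, pvDc, pvCL, pvW]
  | succ k ih =>
    intro hk1
    obtain ⟨ih1, ih2, ih3, ih4⟩ := ih (by omega)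
    set st := (List.range k).foldl (fun st (r : Nat) => pvStepA A st (r : Int))
        ((PySem.Dict.empty : PySem.Dict Char Int), 0, 0, 0) with hst
    have hkA : k < A.length := by omega
    have hunf : (List.range (k+1)).foldl (fun st (r : Nat) => pvStepA A st (r : Int))
        ((PySem.Dict.empty : PySem.Dict Char Int), 0, 0, 0) = pvStepA A st (k : Int) := by
      rw [List.range_succ, List.foldl_append, List.foldl_cons, List.foldl_nil]
    obtain ⟨a1, a2⟩ := pvAddStep A (pvF_le_self A k) hkA st.1 st.2.2.1 ih2 ih3
    have hAt : pvAt A (k : Int) = A[k] := pvAt_eq A hkA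
    obtain ⟨s1, s2, s3⟩ := pvShrink_spec A k (by omega) (A.length + 1) (pvF A k)
      (pvAdd (st.1, st.2.2.1) (PySem.Set.ofList (pvChars A[k]))).1
      (pvAdd (st.1, st.2.2.1) (PySem.Set.ofList (pvChars A[k]))).2
      (pvF_mono A k) (by have := pvF_le_self A k; omega) a1 a2
    rw [hunf]
    have hbody : pvStepA A st (k : Int)
        = ((pvShrink A (A.length + 1)
              ((pvAdd (st.1, st.2.2.1) (PySem.Set.ofList (pvChars A[k]))).1,
               ((pvF A k : Nat) : Int),
               (pvAdd (st.1, st.2.2.1) (PySem.Set.ofList (pvChars A[k]))).2)).1,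
           (pvShrink A (A.length + 1)
              ((pvAdd (st.1, st.2.2.1) (PySem.Set.ofList (pvChars A[k]))).1,
               ((pvF A k : Nat) : Int),
               (pvAdd (st.1, st.2.2.1) (PySem.Set.ofList (pvChars A[k]))).2)).2.1,
           (pvShrink A (A.length + 1)
              ((pvAdd (st.1, st.2.2.1) (PySem.Set.ofList (pvChars A[k]))).1,
               ((pvF A k : Nat) : Int),
               (pvAdd (st.1, st.2.2.1) (PySem.Set.ofList (pvChars A[k]))).2)).2.2,
           max st.2.2.2 ((k : Int) - (pvShrink A (A.length + 1)
              ((pvAdd (st.1, st.2.2.1) (PySem.Set.ofList (pvChars A[k]))).1,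
               ((pvF A k : Nat) : Int),
               (pvAdd (st.1, st.2.2.1) (PySem.Set.ofList (pvChars A[k]))).2)).2.1 + 1)) := by
      rw [pvStepA, hAt, ih1]
    rw [hbody]
    refine ⟨s1, s3, s2, ?_⟩
    rw [s1, ih4, pvResSpec, pvResSpec, List.range_succ, List.foldl_append, List.foldl_cons,
      List.foldl_nil]
    have : (k : Int) - (pvF A (k+1) : Int) + 1 = (k : Int) + 1 - (pvF A (k+1) : Int) := by ring
    rw [this]

lemma pvA_char (A : List Int) : longest_two_digit_fragment A = pvResSpec A A.length := by
  rw [longest_two_digit_fragment]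
  simp only [PySem.List.len_eq, PySem.List.pyRange_zero_natCast, List.foldl_map]
  exact (pvA_loop A A.length le_rfl).2.2.2

def pvMB (A : List Int) (l : Nat) : Nat :=
  Nat.findGreatest (fun t => pvDc A l (l + t) ≤ 2) (A.length - l)

lemma pv_fg_shift (A : List Int) (l r : Nat) (h1 : pvDc A l (r+1) ≤ 2) :
    ∀ b : Nat, Nat.findGreatest (fun t => pvDc A l (r + t) ≤ 2) (b+1)
      = Nat.findGreatest (fun t => pvDc A l (r + 1 + t) ≤ 2) b + 1 := by
  intro b
  induction b with
  | zero =>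
    rw [Nat.findGreatest_succ]
    simp [h1]
  | succ b ihb =>
    rw [Nat.findGreatest_succ, Nat.findGreatest_succ (P := fun t => pvDc A l (r + 1 + t) ≤ 2)]
    rw [show r + (b + 1 + 1) = r + 1 + (b + 1) from by omega]
    by_cases h : pvDc A l (r + 1 + (b + 1)) ≤ 2
    · simp [h]
    · simp [h, ihb]

lemma pvInner_spec (A : List Int) (l : Nat) :
    ∀ (b r : Nat) (digs : PySem.Set Char) (res : Int), A.length - r = b →
      l ≤ r → r ≤ A.length →
      digs.Nodup → digs.toFinset = (pvCL A l r).toFinset →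
      pvDc A l r ≤ 2 → ((r : Int) - (l : Int) ≤ res) →
      pvInner (l : Int) (A.drop r) (r : Int) digs res
        = max res ((r : Int) - (l : Int)
            + (Nat.findGreatest (fun t => pvDc A l (r + t) ≤ 2) (A.length - r) : Int)) := by
  intro b
  induction b with
  | zero =>
    intro r digs res hb hlr hrn _ _ _ hres
    have hrn' : r = A.length := by omega
    subst hrn'
    rw [List.drop_length, pvInner]
    simp [hres, max_eq_left]
  | succ b ihb =>
    intro r digs res hb hlr hrn hnd hfin hok hres
    have hr : r < A.length := by omega
    rw [List.drop_eq_getElem_cons hr, pvInner]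
    have hfin' : (PySem.Set.union digs (pvChars A[r])).toFinset
        = (pvCL A l (r+1)).toFinset := by
      ext x
      simp only [List.mem_toFinset, PySem.Set.mem_union]
      rw [← List.mem_toFinset, hfin, pvCL_succ A hlr hr]
      simp [List.mem_toFinset]
    have hnd' : (PySem.Set.union digs (pvChars A[r])).Nodup :=
      PySem.Set.nodup_union _ _ hnd
    have hlen : PySem.Set.len (PySem.Set.union digs (pvChars A[r]))
        = (pvDc A l (r+1) : Int) := by
      rw [PySem.Set.len_eq]
      congr 1
      rw [← List.Nodup.dedup hnd', ← List.card_toFinset, hfin', pvDc]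
    rw [hlen]
    by_cases hbig : 2 < (pvDc A l (r+1) : Int)
    · rw [if_pos hbig]
      have hfg : Nat.findGreatest (fun t => pvDc A l (r + t) ≤ 2) (A.length - r) = 0 := by
        rw [Nat.findGreatest_eq_zero_iff]
        intro t ht _ hP
        have : pvDc A l (r + 1) ≤ pvDc A l (r + t) := pvDc_mono A (le_refl l) (by omega)
        omega
      rw [hfg]
      simp [hres, max_eq_left]
    · rw [if_neg hbig]
      have hok1 : pvDc A l (r+1) ≤ 2 := by omega
      have hcast : (r : Int) + 1 = ((r + 1 : Nat) : Int) := by push_cast; ring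
      rw [hcast]
      rw [ihb (r+1) _ _ (by omega) (by omega) (by omega) hnd' hfin' hok1
        (by rw [← hcast]; omega)]
      have hshift := pv_fg_shift A l r hok1 (A.length - r - 1)
      rw [show A.length - r = (A.length - r - 1) + 1 from by omega,
        show A.length - (r+1) = A.length - r - 1 from by omega, hshift]
      push_cast
      rw [max_assoc]
      congr 1
      rw [max_eq_right (by omega)]
      ring_nf

lemma pvB_one (A : List Int) (l : Nat) (res : Int) (hres : 0 ≤ res) (hl : l ≤ A.length) :
    pvInner (l : Int) (A.drop l) (l : Int) PySem.Set.empty res = max res (pvMB A l : Int) := by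
  rw [pvInner_spec A l (A.length - l) l PySem.Set.empty res rfl (le_refl l) hl
    List.nodup_nil (by simp [pvCL, pvW, Nat.sub_eq_zero_of_le (le_refl l), PySem.Set.empty])
    (by simp [pvDc, pvCL, pvW, Nat.sub_eq_zero_of_le (le_refl l)]) (by omega)]
  rw [pvMB]
  congr 1
  omega

lemma pvB_loop (A : List Int) : ∀ (k : Nat), k ≤ A.length →
    ((List.range k).foldl (fun res (l : Nat) =>
        pvInner (l : Int) (A.drop ((l : Int)).toNat) (l : Int) PySem.Set.empty res) 0)
      = (List.range k).foldl (fun (m : Int) (l : Nat) => max m ((pvMB A l : Nat) : Int)) 0 ∧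
    0 ≤ ((List.range k).foldl (fun res (l : Nat) =>
        pvInner (l : Int) (A.drop ((l : Int)).toNat) (l : Int) PySem.Set.empty res) 0) := by
  intro k
  induction k with
  | zero => simp
  | succ k ih =>
    intro hk
    obtain ⟨ih1, ih2⟩ := ih (by omega)
    rw [List.range_succ, List.foldl_append, List.foldl_cons, List.foldl_nil,
      List.foldl_append, List.foldl_cons, List.foldl_nil]
    rw [Int.toNat_natCast]
    rw [pvB_one A k _ ih2 (by omega), ih1]
    exact ⟨rfl, le_trans ih2 (by rw [← ih1]; exact le_max_left _ _)⟩

lemma pvB_char (A : List Int) :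
    longest_two_digit_fragment_alt A
      = (List.range A.length).foldl (fun (m : Int) (l : Nat) => max m ((pvMB A l : Nat) : Int)) 0 := by
  rw [longest_two_digit_fragment_alt]
  simp only [PySem.List.len_eq, PySem.List.pyRange_zero_natCast, List.foldl_map]
  exact (pvB_loop A A.length le_rfl).1

lemma pv_foldl_max_le (t : List Int) :
    ∀ (a v : Int), a ≤ v → (∀ y ∈ t, y ≤ v) → List.foldl max a t ≤ v := by
  induction t with
  | nil => intro a v ha _; simpa using ha
  | cons x xs ih =>
    intro a v ha h
    rw [List.foldl_cons]
    exact ih _ v (max_le ha (h x (List.mem_cons_self))) fun y hy => h y (List.mem_cons_of_mem x hy)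

lemma pv_bridge' (A : List Int) :
    List.foldl max 0 ((List.range A.length).map (fun (r : Nat) => (r : Int) + 1 - (pvF A (r + 1) : Int)))
      = List.foldl max 0 ((List.range A.length).map (fun (l : Nat) => ((pvMB A l : Nat) : Int))) := by
  apply le_antisymm
  · apply pv_foldl_max_le _ 0 _ (PySem.List.le_foldl_max _ _).1
    intro y hy
    rw [List.mem_map] at hy
    obtain ⟨r, hr, rfl⟩ := hy
    rw [List.mem_range] at hr
    by_cases hFr : pvF A (r+1) ≤ r
    · -- the window [pvF (r+1), r+1) is valid and starts at l := pvF (r+1) < length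
      set l := pvF A (r+1) with hl
      have hln : l < A.length := by omega
      have hP : pvDc A l (l + (r + 1 - l)) ≤ 2 := by
        rw [show l + (r + 1 - l) = r + 1 from by omega]
        exact pvF_ok A (r+1)
      have hle : r + 1 - l ≤ Nat.findGreatest (fun t => pvDc A l (l + t) ≤ 2) (A.length - l) :=
        Nat.le_findGreatest (by omega) hP
      have hmem : ((pvMB A l : Nat) : Int)
          ∈ (List.range A.length).map (fun (l : Nat) => ((pvMB A l : Nat) : Int)) :=
        List.mem_map_of_mem (List.mem_range.2 hln)
      have := (PySem.List.le_foldl_max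
        ((List.range A.length).map (fun (l : Nat) => ((pvMB A l : Nat) : Int))) 0).2 _ hmem
      have hle' : r + 1 - l ≤ pvMB A l := hle
      omega
    · have : pvF A (r+1) = r + 1 := by
        have := pvF_le_self A (r+1); omega
      rw [this]
      have h0 := (PySem.List.le_foldl_max
        ((List.range A.length).map (fun (l : Nat) => ((pvMB A l : Nat) : Int))) 0).1
      omega
  · apply pv_foldl_max_le _ 0 _ (PySem.List.le_foldl_max _ _).1
    intro y hy
    rw [List.mem_map] at hy
    obtain ⟨l, hl, rfl⟩ := hy
    rw [List.mem_range] at hl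
    set t := pvMB A l with ht
    by_cases ht0 : t = 0
    · rw [ht0]
      have h0 := (PySem.List.le_foldl_max
        ((List.range A.length).map (fun (r : Nat) => (r : Int) + 1 - (pvF A (r + 1) : Int))) 0).1
      omega
    · have htp : 0 < t := Nat.pos_of_ne_zero ht0
      have htle : t ≤ A.length - l := Nat.findGreatest_le _
      have hP0 : pvDc A l (l + 0) ≤ 2 := by
        simp [pvDc, pvCL, pvW, Nat.sub_eq_zero_of_le (le_refl l)]
      have hPt : pvDc A l (l + t) ≤ 2 := by
        rw [ht, pvMB]
        exact Nat.findGreatest_spec (P := fun t => pvDc A l (l + t) ≤ 2) (Nat.zero_le _) hP0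
      have hrA : l + t - 1 < A.length := by omega
      have hFle : pvF A (l + t - 1 + 1) ≤ l := by
        apply pvF_le
        rw [show l + t - 1 + 1 = l + t from by omega]
        exact hPt
      have hmem : ((l + t - 1 : Nat) : Int) + 1 - (pvF A (l + t - 1 + 1) : Int)
          ∈ (List.range A.length).map (fun (r : Nat) => (r : Int) + 1 - (pvF A (r + 1) : Int)) :=
        List.mem_map_of_mem (List.mem_range.2 hrA)
      have hub := (PySem.List.le_foldl_max
        ((List.range A.length).map (fun (r : Nat) => (r : Int) + 1 - (pvF A (r + 1) : Int))) 0).2 _ hmem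
      have hc1 : ((l + t - 1 : Nat) : Int) = (l : Int) + (t : Int) - 1 := by omega
      have hc2 : (pvF A (l + t - 1 + 1) : Int) ≤ (l : Int) := by exact_mod_cast hFle
      omega

lemma pv_bridge (A : List Int) :
    pvResSpec A A.length
      = (List.range A.length).foldl (fun (m : Int) (l : Nat) => max m ((pvMB A l : Nat) : Int)) 0 := by
  have h := pv_bridge' A
  simp only [List.foldl_map] at h
  simpa [pvResSpec] using h

lemma pv_final (A : List Int) : longest_two_digit_fragment A = longest_two_digit_fragment_alt A := by
  rw [pvA_char, pvB_char, pv_bridge]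

-- ===== VERDICT (by name: the statement is the Claim_ definition above) =====
theorem longest_two_digit_fragment_spec : Claim_equal_longest_two_digit_fragment := by
  intro A _
  unfold Spec_longest_two_digit_fragment
  exact pv_final A
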